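-- pv_equiv track=rewrite | github.com/geraw/logic_simulator | scoring_framework.py | generate_all_bitstring_combinations
-- ===== SOURCE A (Python) =====
-- from typing import Dict, Any, Callable, Optional, List
--
-- def generate_all_bitstring_combinations(num_bits: int, signal_names: List[str]) -> List[Dict[str, Any]]:
--     """Generate all possible bitstring combinations for given signals."""
--     import itertools
--
--     bitstrings = ["".join(bits) for bits in itertools.product('01', repeat=num_bits)]
--     test_cases = []
--
--     # Generate all combinations
--     for combination in itertools.product(bitstrings, repeat=len(signal_names)):
--         inputs = dict(zip(signal_names, combination))
--         test_cases.append({'inputs': inputs})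
--
--     return test_cases
-- ===== SOURCE B (Python) =====
-- def generate_all_bitstring_combinations(num_bits, signal_names):
--     """Generate all possible bitstring combinations for given signals."""
--     n = len(signal_names)
--     total = num_bits * n
--     test_cases = []
--     for i in range(2 ** total):
--         full = bin(i)[2:].zfill(total)
--         inputs = {name: full[j * num_bits:(j + 1) * num_bits]
--                   for j, name in enumerate(signal_names)}
--         test_cases.append({'inputs': inputs})
--     return test_cases
-- ===== Notes on version B (the rewrite author's own statement) =====
-- stated objective: alternative
-- what changed: Replaces the nested itertools.product construction by a single flat loop over one integer counter i in range(2**(num_bits*len(signal_names))): each test case is decoded directly from i by taking the zero-padded binary expansion of i and slicing it into per-signal blocks, so no bitstring pool and no cartesian product are ever built.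
import Mathlib
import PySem

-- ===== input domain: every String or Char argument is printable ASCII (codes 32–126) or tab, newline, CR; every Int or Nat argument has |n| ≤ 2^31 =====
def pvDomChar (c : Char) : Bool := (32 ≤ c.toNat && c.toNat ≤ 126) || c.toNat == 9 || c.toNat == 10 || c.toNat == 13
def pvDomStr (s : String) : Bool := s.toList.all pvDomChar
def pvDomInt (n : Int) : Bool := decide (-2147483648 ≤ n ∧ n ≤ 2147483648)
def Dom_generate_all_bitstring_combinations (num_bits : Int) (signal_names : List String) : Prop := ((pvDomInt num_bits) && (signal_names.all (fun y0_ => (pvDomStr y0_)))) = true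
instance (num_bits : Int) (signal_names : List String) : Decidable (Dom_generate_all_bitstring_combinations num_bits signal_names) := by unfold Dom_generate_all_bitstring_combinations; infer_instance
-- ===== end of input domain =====

-- B replaces the double itertools.product by one flat counter loop that decodes every test
-- case from the binary expansion of the counter; same return value, no speed claim.

-- ===== PORT A =====
-- itertools.product(pool, repeat=n): leftmost position varies slowest.
def pyProdRepeat {α : Type} (pool : List α) : Nat → List (List α)
  | 0 => [[]]
  | n + 1 => pool.flatMap (fun x => (pyProdRepeat pool n).map (fun rest => x :: rest))

def generate_all_bitstring_combinations (num_bits : Int) (signal_names : List String) : List (List (String × List (String × String))) :=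
  let bitstrings := (pyProdRepeat ['0', '1'] num_bits.toNat).map (fun bits => String.ofList bits)
  (pyProdRepeat bitstrings signal_names.length).foldl
    (fun test_cases combination =>
      let inputs := PySem.Dict.ofList (signal_names.zip combination)
      test_cases ++ [[("inputs", inputs.items)]]) []

-- ===== PORT B =====
-- bin(i)[2:]: the binary digits of i, MSB first ('0' for i = 0); exact for i : Nat.
def pyBinDigits : Nat → List Char
  | 0 => []
  | (n + 1) => pyBinDigits ((n + 1) / 2) ++ [if (n + 1) % 2 = 1 then '1' else '0']
decreasing_by exact Nat.div_lt_self (Nat.succ_pos n) (by norm_num)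

def pyBin (i : Nat) : List Char := if i = 0 then ['0'] else pyBinDigits i

-- str.zfill(w): left-pad with '0' to width w (no sign handling needed: input is '0'/'1' only).
def pyZfill (w : Nat) (l : List Char) : List Char := List.replicate (w - l.length) '0' ++ l

def generate_all_bitstring_combinations_alt (num_bits : Int) (signal_names : List String) : List (List (String × List (String × String))) :=
  let n := signal_names.length
  let total := num_bits.toNat * n
  (List.range (2 ^ total)).foldl
    (fun test_cases i =>
      let full := String.ofList (pyZfill total (pyBin i))
      let inputs := (PySem.List.enumerate signal_names 0).foldl
        (fun d p => d.insert p.2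
          (PySem.Str.slice full (some (p.1 * num_bits)) (some ((p.1 + 1) * num_bits))))
        PySem.Dict.empty
      test_cases ++ [[("inputs", inputs.items)]]) []

-- ===== PRECONDITION & SPEC =====
-- Both Pythons raise on num_bits < 0 (A: itertools.product rejects a negative repeat; B: range(float)).
def Pre_generate_all_bitstring_combinations (num_bits : Int) (_signal_names : List String) : Prop := 0 ≤ num_bits
instance (num_bits : Int) (signal_names : List String) : Decidable (Pre_generate_all_bitstring_combinations num_bits signal_names) := by unfold Pre_generate_all_bitstring_combinations; infer_instance
def pvWitness_generate_all_bitstring_combinations : Int × List String := (2, ["a", "b"])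

def Spec_generate_all_bitstring_combinations (num_bits : Int) (signal_names : List String) (out : List (List (String × List (String × String)))) : Prop := out = generate_all_bitstring_combinations_alt num_bits signal_names
instance (num_bits : Int) (signal_names : List String) (out : List (List (String × List (String × String)))) : Decidable (Spec_generate_all_bitstring_combinations num_bits signal_names out) := by unfold Spec_generate_all_bitstring_combinations; infer_instance

-- ===== CLAIM (what is proved, stated in full; the proofs are below) =====
def Claim_equal_generate_all_bitstring_combinations : Prop := ∀ (num_bits : Int) (signal_names : List String), Dom_generate_all_bitstring_combinations num_bits signal_names → Pre_generate_all_bitstring_combinations num_bits signal_names → Spec_generate_all_bitstring_combinations num_bits signal_names (generate_all_bitstring_combinations num_bits signal_names)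

-- ===== LEMMAS AND PROOFS =====

-- the w-digit binary expansion of i, MSB first (used to characterise both sides)
def bsChars (w i : Nat) : List Char :=
  (List.range w).reverse.map (fun k => if i.testBit k then '1' else '0')

-- generic: foldl appending singletons is map
theorem foldl_append_singleton {α β : Type} (f : α → β) (l : List α) (acc : List β) :
    l.foldl (fun tc x => tc ++ [f x]) acc = acc ++ l.map f := by
  induction l generalizing acc with
  | nil => simp
  | cons x xs ih => simp [ih]

-- A's product('01', repeat=nb) enumerates exactly the nb-digit binary expansions of 0..2^nb-1.
theorem prod01_eq_range (nb : Nat) :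
    pyProdRepeat ['0', '1'] nb = (List.range (2 ^ nb)).map (bsChars nb) := by
  induction nb with
  | zero => rfl
  | succ n ih =>
    have hpow : 2 ^ (n + 1) = 2 ^ n + 2 ^ n := by ring
    have hrev : (List.range (n + 1)).reverse = n :: (List.range n).reverse := by
      simp [List.range_succ]
    calc pyProdRepeat ['0', '1'] (n + 1)
        = (pyProdRepeat ['0', '1'] n).map (fun rest => '0' :: rest)
            ++ (pyProdRepeat ['0', '1'] n).map (fun rest => '1' :: rest) := by
          simp [pyProdRepeat]
      _ = _ := by
          rw [ih]
          have hbs : ∀ w, bsChars w = fun i =>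
              (List.range w).reverse.map (fun k => if i.testBit k then '1' else '0') :=
            fun w => funext fun i => rfl
          simp only [hbs, hrev, List.map_cons]
          rw [hpow, List.range_add, List.map_append]
          simp only [List.map_map]
          congr 1
          · apply List.map_congr_left
            intro i hi
            have h0 : i.testBit n = false := Nat.testBit_lt_two_pow (List.mem_range.mp hi)
            simp [h0]
          · apply List.map_congr_left
            intro i hi
            have hlt : i < 2 ^ n := List.mem_range.mp hi
            have h1 : (2 ^ n + i).testBit n = true := by
              have := Nat.testBit_mul_two_pow_add_eq 1 i n
              simpa [Nat.testBit_lt_two_pow hlt] using this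
            simp [h1]
            intro k hk
            rw [Nat.testBit_two_pow_add_gt hk i]

-- range over a product splits into blocks
theorem range_mul_flatMap {α : Type} (b c : Nat) (g : Nat → α) :
    (List.range (b * c)).map g
      = (List.range b).flatMap (fun d => (List.range c).map (fun r => g (d * c + r))) := by
  induction b with
  | zero => simp
  | succ b ih =>
    rw [Nat.succ_mul, List.range_add, List.map_append, ih, List.range_succ,
      List.flatMap_append]
    simp [List.map_map, Function.comp_def]

-- digit arithmetic: the (j+1)-st base-c digit of d*c^n + r is the j-th digit of r
theorem digit_shift (c d r n e : Nat) (hc : 0 < c) (he : e + 1 ≤ n) :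
    (d * c ^ n + r) / c ^ e % c = r / c ^ e % c := by
  have h1 : c ^ n = c ^ (n - e - 1) * c * c ^ e := by
    rw [mul_assoc, ← pow_succ']
    rw [← pow_add]
    congr 1
    omega
  rw [h1, ← mul_assoc]
  rw [Nat.add_comm, Nat.add_mul_div_right _ _ (pow_pos hc e)]
  rw [← mul_assoc, Nat.add_mul_mod_self_right]

-- product(pool, repeat=n) over an indexed pool = base-c digit decoding of one counter
theorem prodRepeat_range_decode {α : Type} (c : Nat) (hc : 0 < c) (f : Nat → α) (n : Nat) :
    pyProdRepeat ((List.range c).map f) n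
      = (List.range (c ^ n)).map
          (fun i => (List.range n).map (fun j => f (i / c ^ (n - 1 - j) % c))) := by
  induction n with
  | zero => simp [pyProdRepeat]
  | succ n ih =>
    rw [pyProdRepeat, ih, pow_succ']
    rw [range_mul_flatMap (b := c) (c := c ^ n)]
    rw [List.flatMap_map]
    apply List.flatMap_congr
    intro d hd
    rw [List.map_map]
    apply List.map_congr_left
    intro r hr
    have hd' : d < c := List.mem_range.mp hd
    have hr' : r < c ^ n := List.mem_range.mp hr
    rw [List.range_succ_eq_map]
    simp only [List.map_cons, List.map_map, Function.comp_def]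
    congr 1
    · congr 1
      have h0 : n + 1 - 1 - 0 = n := by omega
      have hdiv : (d * c ^ n + r) / c ^ n = d := by
        rw [mul_comm, Nat.mul_add_div (pow_pos hc n), Nat.div_eq_of_lt hr', Nat.add_zero]
      rw [h0, hdiv, Nat.mod_eq_of_lt hd']
    · apply List.map_congr_left
      intro x hx
      have hx' : x < n := List.mem_range.mp hx
      have he : n + 1 - 1 - x.succ = n - 1 - x := by omega
      rw [he, digit_shift c d r n (n - 1 - x) hc (by omega)]

-- zip with range-indexed values rewritten through enumerate
theorem zip_range_map_eq_enumerate {β : Type} (names : List String) (g : Nat → β) :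
    names.zip ((List.range names.length).map g)
      = (PySem.List.enumerate names 0).map (fun p => (p.2, g p.1.toNat)) := by
  apply List.ext_getElem
  · simp [PySem.List.length_enumerate]
  · intro k h1 h2
    simp only [List.getElem_zip, List.getElem_map, List.getElem_range,
      PySem.List.getElem_enumerate]
    simp

-- the binary expansion splits as blocks
theorem bsChars_add (a b i : Nat) :
    bsChars (a + b) i = bsChars a (i / 2 ^ b) ++ bsChars b i := by
  unfold bsChars
  rw [Nat.add_comm a b, List.range_add, List.reverse_append, List.map_append,
    List.map_reverse, List.map_map, ← List.map_reverse]
  congr 1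
  rw [List.map_reverse, List.map_reverse]
  congr 1
  apply List.map_congr_left
  intro k _
  simp [Nat.testBit_div_two_pow, Nat.add_comm]

theorem bsChars_mod (w i : Nat) : bsChars w (i % 2 ^ w) = bsChars w i := by
  unfold bsChars
  apply List.map_congr_left
  intro k hk
  have : k < w := by
    have := List.mem_reverse.mp hk
    exact List.mem_range.mp this
  rw [Nat.testBit_mod_two_pow]
  simp [this]

theorem length_bsChars (w i : Nat) : (bsChars w i).length = w := by
  simp [bsChars]

theorem bsChars_one (x : Nat) : bsChars 1 x = [if x % 2 = 1 then '1' else '0'] := by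
  simp [bsChars, List.range_succ, Nat.testBit_zero]

-- bin(i)[2:].zfill(w) is the w-digit binary expansion, for i < 2^w
theorem zfill_binDigits (w : Nat) : ∀ i, i < 2 ^ w → pyZfill w (pyBinDigits i) = bsChars w i := by
  induction w with
  | zero =>
    intro i hi
    have : i = 0 := by simpa using hi
    subst this
    simp [pyZfill, pyBinDigits, bsChars]
  | succ w ih =>
    intro i hi
    have hsplit : bsChars (w + 1) i = bsChars w (i / 2) ++ bsChars 1 i := by
      have h := bsChars_add w 1 i
      rw [Nat.add_comm w 1] at h
      rw [Nat.add_comm 1 w] at h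
      simpa using h
    have h2 : i / 2 < 2 ^ w := by
      apply Nat.div_lt_of_lt_mul
      rw [mul_comm, ← pow_succ]
      exact hi
    cases i with
    | zero =>
      simp [pyBinDigits, pyZfill, bsChars, Nat.zero_testBit, List.map_const']
    | succ m =>
      rw [pyBinDigits, hsplit, ← ih _ h2, bsChars_one]
      unfold pyZfill
      rw [List.length_append, List.length_singleton]
      have harith : w + 1 - ((pyBinDigits ((m + 1) / 2)).length + 1)
          = w - (pyBinDigits ((m + 1) / 2)).length := by omega
      rw [harith, List.append_assoc]

theorem pyZfill_pyBin (w i : Nat) (hw : 0 < w) (hi : i < 2 ^ w) :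
    pyZfill w (pyBin i) = bsChars w i := by
  unfold pyBin
  split
  · next h =>
    subst h
    have hz : bsChars w 0 = List.replicate w '0' := by
      simp [bsChars, Nat.zero_testBit, List.map_const']
    rw [hz]
    unfold pyZfill
    have hw1 : w = (w - 1) + 1 := by omega
    rw [hw1, List.replicate_succ']
    simp
  · exact zfill_binDigits w i hi

-- slicing block j out of the full expansion gives the j-th digit's expansion
theorem slice_bsChars (nb n j i : Nat) (hj : j < n) :
    ((bsChars (nb * n) i).drop (j * nb)).take nb
      = bsChars nb (i / 2 ^ (nb * (n - 1 - j))) := by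
  obtain ⟨m, rfl⟩ : ∃ m, n = j + 1 + m := ⟨n - 1 - j, by omega⟩
  have hm : j + 1 + m - 1 - j = m := by omega
  have h1 : nb * (j + 1 + m) = j * nb + (nb + nb * m) := by ring
  rw [hm, h1, bsChars_add, bsChars_add]
  rw [List.drop_left' (length_bsChars _ _)]
  rw [List.take_left' (length_bsChars _ _)]

-- ===== VERDICT (by name: the statement is the Claim_ definition above) =====
theorem generate_all_bitstring_combinations_spec : Claim_equal_generate_all_bitstring_combinations := by
  intro num_bits signal_names _ hpre
  unfold Spec_generate_all_bitstring_combinations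
  simp only [generate_all_bitstring_combinations, generate_all_bitstring_combinations_alt]
  rw [foldl_append_singleton, foldl_append_singleton, List.nil_append, List.nil_append]
  have hnb : num_bits = ((num_bits.toNat : Nat) : Int) := (Int.toNat_of_nonneg hpre).symm
  rw [prod01_eq_range, List.map_map]
  simp only [Function.comp_def]
  rw [prodRepeat_range_decode (2 ^ num_bits.toNat) (by positivity)
      (fun x => String.ofList (bsChars num_bits.toNat x)) signal_names.length]
  rw [← pow_mul, List.map_map]
  apply List.map_congr_left
  intro i hi
  simp only [Function.comp_def]
  congr 2
  -- both dicts are a foldl of inserts over the same pair list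
  rw [show ∀ l : List (String × String), PySem.Dict.ofList l
        = l.foldl (fun d q => d.insert q.1 q.2) PySem.Dict.empty from fun _ => rfl]
  rw [zip_range_map_eq_enumerate signal_names
      (fun j => String.ofList (bsChars num_bits.toNat
        (i / (2 ^ num_bits.toNat) ^ (signal_names.length - 1 - j) % 2 ^ num_bits.toNat)))]
  rw [List.foldl_map]
  congr 1
  apply PySem.List.foldl_congr_mem
  intro acc p hp
  obtain ⟨k, hk, rfl⟩ := (PySem.List.mem_enumerate_iff _ _ _).mp hp
  congr 1
  -- the sliced block equals the decoded digit's expansion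
  apply String.toList_inj.mp
  rw [PySem.Str.toList_slice, PySem.Chars.slice_eq_listSlice, String.toList_ofList]
  have hb1 : (0 + (k : Int)) * num_bits = ((k * num_bits.toNat : Nat) : Int) := by
    push_cast [Int.toNat_of_nonneg hpre]; ring
  have hb2 : (0 + (k : Int) + 1) * num_bits
      = ((k * num_bits.toNat : Nat) : Int) + ((num_bits.toNat : Nat) : Int) := by
    push_cast [Int.toNat_of_nonneg hpre]; ring
  rw [hb1, hb2, PySem.List.slice_natCast_add, String.toList_ofList]
  rcases Nat.eq_zero_or_pos num_bits.toNat with h0 | h0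
  · simp [h0, bsChars]
  · have htot : 0 < num_bits.toNat * signal_names.length :=
      Nat.mul_pos h0 (by omega)
    have hilt : i < 2 ^ (num_bits.toNat * signal_names.length) := List.mem_range.mp hi
    rw [pyZfill_pyBin _ _ htot hilt]
    rw [slice_bsChars _ _ _ _ hk]
    rw [← pow_mul, bsChars_mod]
    simp
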